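-- pv_equiv track=rewrite | github.com/Ithri-I3/Sudoku-Solver | Sudoku.py | definition_mat_local
-- ===== SOURCE A (Python) =====
-- def definition_mat_local(x,y):
--     c_left = [0,1,2]
--     c_center=[3,4,5]
--     c_right=[6,7,8]
--     l_up=[0,1,2]
--     l_center=[3,4,5]
--     l_down=[6,7,8]
--     c=[c_left,c_center,c_right]
--     l=[l_up,l_center,l_down]
--     mtrx_loc=[]
--     i=0
--     while i<3:
--         j=0
--         while j<3:
--             if c[i][j]==x:
--                 mtrx_loc.append(c[i])
--             j+=1
--         i+=1
--     i = 0
--     while i < 3: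
--         j = 0
--         while j < 3:
--             if l[i][j] == y:
--                 mtrx_loc.append(l[i])
--             j += 1
--         i += 1
--     return mtrx_loc
-- ===== SOURCE B (Python) =====
-- def definition_mat_local(x, y):
--     blocks = [[0, 1, 2], [3, 4, 5], [6, 7, 8]]
--     res = []
--     if x in range(9):
--         res.append(blocks[x // 3])
--     if y in range(9):
--         res.append(blocks[y // 3])
--     return res
-- ===== Notes on version B (the rewrite author's own statement) =====
-- stated objective: simpler
-- what changed: Replaces the two 3x3 nested while-scans with direct O(1) block lookup blocks[v//3] guarded by a range(9) membership test, preserving the x-block-then-y-block order.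
import Mathlib
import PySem

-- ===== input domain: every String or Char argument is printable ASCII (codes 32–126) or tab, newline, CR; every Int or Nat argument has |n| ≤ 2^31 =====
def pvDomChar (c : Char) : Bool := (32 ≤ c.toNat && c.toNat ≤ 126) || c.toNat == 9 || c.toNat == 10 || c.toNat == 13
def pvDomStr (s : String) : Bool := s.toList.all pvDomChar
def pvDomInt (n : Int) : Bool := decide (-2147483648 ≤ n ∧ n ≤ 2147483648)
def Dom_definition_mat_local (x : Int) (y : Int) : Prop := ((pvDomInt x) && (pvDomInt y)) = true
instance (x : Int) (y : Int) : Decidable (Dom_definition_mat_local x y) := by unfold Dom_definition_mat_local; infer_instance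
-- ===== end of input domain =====

-- B replaces A's two 3x3 nested while-scans with direct blocks[v//3] lookups guarded by a
-- range(9) membership test (objective: simpler); equal return values proved for all ints.


-- ===== PORT A =====
-- the nested 'while j<3: if c[i][j]==v: append c[i]' scan over the three rows, as a fold
def pvScanRows (rows : List (List Int)) (v : Int) (acc : List (List Int)) : List (List Int) :=
  rows.foldl (fun a row => row.foldl (fun a e => if e = v then a ++ [row] else a) a) acc

def definition_mat_local (x : Int) (y : Int) : List (List Int) :=
  let c : List (List Int) := [[0, 1, 2], [3, 4, 5], [6, 7, 8]]
  let l : List (List Int) := [[0, 1, 2], [3, 4, 5], [6, 7, 8]]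
  pvScanRows l y (pvScanRows c x [])

-- ===== PORT B =====
def definition_mat_local_alt (x : Int) (y : Int) : List (List Int) :=
  let blocks : List (List Int) := [[0, 1, 2], [3, 4, 5], [6, 7, 8]]
  let res : List (List Int) := []
  -- 'if v in range(9): res.append(blocks[v // 3])'; the guard makes the index in range,
  -- so pyGetD with default [] is exact here
  let res := if 0 ≤ x ∧ x < 9 then res ++ [PySem.List.pyGetD blocks (PySem.Int.floordiv x 3) []] else res
  let res := if 0 ≤ y ∧ y < 9 then res ++ [PySem.List.pyGetD blocks (PySem.Int.floordiv y 3) []] else res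
  res

-- ===== PRECONDITION & SPEC =====
def Spec_definition_mat_local (x : Int) (y : Int) (out : List (List Int)) : Prop := out = definition_mat_local_alt x y
instance (x : Int) (y : Int) (out : List (List Int)) : Decidable (Spec_definition_mat_local x y out) := by unfold Spec_definition_mat_local; infer_instance

-- ===== CLAIM (what is proved, stated in full; the proofs are below) =====
def Claim_equal_definition_mat_local : Prop := ∀ (x : Int) (y : Int), Dom_definition_mat_local x y → Spec_definition_mat_local x y (definition_mat_local x y)

-- ===== LEMMAS AND PROOFS =====
-- what one scan pass appends: the block of v, if v is a cell value
def pvBlockOf (v : Int) : List (List Int) :=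
  if 0 ≤ v ∧ v < 9 then [PySem.List.pyGetD [[0, 1, 2], [3, 4, 5], [6, 7, 8]] (PySem.Int.floordiv v 3) []] else []

theorem pvScanRows_eq (v : Int) (acc : List (List Int)) :
    pvScanRows [[0, 1, 2], [3, 4, 5], [6, 7, 8]] v acc = acc ++ pvBlockOf v := by
  by_cases h : 0 ≤ v ∧ v < 9
  · obtain ⟨h0, h9⟩ := h
    interval_cases v <;> simp [pvScanRows, pvBlockOf] <;> decide
  · simp only [pvScanRows, pvBlockOf, List.foldl]
    rw [if_neg h]
    rw [if_neg (by omega), if_neg (by omega), if_neg (by omega), if_neg (by omega),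
        if_neg (by omega), if_neg (by omega), if_neg (by omega), if_neg (by omega),
        if_neg (by omega)]
    simp

-- ===== VERDICT (by name: the statement is the Claim_ definition above) =====
theorem definition_mat_local_spec : Claim_equal_definition_mat_local := by
  intro x y _
  show definition_mat_local x y = definition_mat_local_alt x y
  simp only [definition_mat_local, definition_mat_local_alt, pvScanRows_eq, pvBlockOf]
  split_ifs <;> simp
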